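-- pv_equiv track=rewrite | github.com/EspenLaerk/LazyWaveOpt | results_processing.py | map_evaluations_to_generations
-- ===== SOURCE A (Python) =====
-- def map_evaluations_to_generations(num_evals, evals_per_gen):
--     """
--     Map each evaluation index to its generation number.
--     Returns a list of generation numbers for each evaluation.
--     """
--     gen_map = []
--     idx = 0
--     for gen, n in enumerate(evals_per_gen):
--         for _ in range(n):
--             if idx >= num_evals:
--                 break
--             gen_map.append(gen)
--             idx += 1
--     return gen_map
-- ===== SOURCE B (Python) =====
-- def map_evaluations_to_generations(num_evals, evals_per_gen):
--     """
--     Map each evaluation index to its generation number.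
--     Returns a list of generation numbers for each evaluation.
--     """
--     gen_map = []
--     remaining = num_evals
--     for gen, n in enumerate(evals_per_gen):
--         k = max(0, min(n, remaining))
--         gen_map.extend([gen] * k)
--         remaining -= k
--     return gen_map
-- ===== Notes on version B (the rewrite author's own statement) =====
-- stated objective: simpler
-- what changed: Replaces A's nested per-evaluation inner loop with a global index and break by a single pass over the generations that emits each generation's whole block at once via list repetition of a clamped count, threading only the remaining budget.
import Mathlib
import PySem

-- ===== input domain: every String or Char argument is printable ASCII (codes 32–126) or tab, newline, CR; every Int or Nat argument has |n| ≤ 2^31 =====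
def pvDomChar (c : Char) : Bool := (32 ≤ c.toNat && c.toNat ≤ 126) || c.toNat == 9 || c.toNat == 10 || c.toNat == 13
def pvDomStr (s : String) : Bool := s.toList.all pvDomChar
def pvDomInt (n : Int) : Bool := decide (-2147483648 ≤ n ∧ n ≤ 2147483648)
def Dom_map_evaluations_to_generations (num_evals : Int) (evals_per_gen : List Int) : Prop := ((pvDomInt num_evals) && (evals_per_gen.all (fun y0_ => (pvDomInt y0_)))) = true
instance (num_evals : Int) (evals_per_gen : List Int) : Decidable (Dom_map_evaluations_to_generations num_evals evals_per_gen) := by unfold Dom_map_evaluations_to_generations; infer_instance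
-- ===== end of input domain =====

-- B replaces A's nested per-evaluation loops by a recursion over the generations that
-- emits each generation's block at once via replication of a clamped count (objective: simpler).

-- ===== PORT A =====
-- inner 'for _ in range(n)' loop of A: fuel = number of range iterations left
def pvInnerA (num_evals gen : Int) : Nat → Int → List Int → Int × List Int
  | 0, idx, acc => (idx, acc)
  | k + 1, idx, acc =>
      if num_evals ≤ idx then (idx, acc)
      else pvInnerA num_evals gen k (idx + 1) (acc ++ [gen])

-- outer 'for gen, n in enumerate(evals_per_gen)' loop, gen and idx threaded
def pvOuterA (num_evals : Int) : Int → Int → List Int → List Int → List Int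
  | _, _, acc, [] => acc
  | gen, idx, acc, n :: rest =>
      let r := pvInnerA num_evals gen n.toNat idx acc
      pvOuterA num_evals (gen + 1) r.1 r.2 rest

def map_evaluations_to_generations (num_evals : Int) (evals_per_gen : List Int) : List Int :=
  pvOuterA num_evals 0 0 [] evals_per_gen

-- ===== PORT B =====
-- single pass over enumerate, emitting each generation's block by replication of a clamped count
def map_evaluations_to_generations_alt (num_evals : Int) (evals_per_gen : List Int) : List Int :=
  ((PySem.List.enumerate evals_per_gen 0).foldl
    (fun (st : List Int × Int) p =>
      let k := max 0 (min p.2 st.2)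
      (st.1 ++ List.replicate k.toNat p.1, st.2 - k))
    ([], num_evals)).1

-- ===== PRECONDITION & SPEC =====
def Spec_map_evaluations_to_generations (num_evals : Int) (evals_per_gen : List Int) (out : List Int) : Prop := out = map_evaluations_to_generations_alt num_evals evals_per_gen
instance (num_evals : Int) (evals_per_gen : List Int) (out : List Int) : Decidable (Spec_map_evaluations_to_generations num_evals evals_per_gen out) := by unfold Spec_map_evaluations_to_generations; infer_instance

-- ===== CLAIM (what is proved, stated in full; the proofs are below) =====
def Claim_equal_map_evaluations_to_generations : Prop := ∀ (num_evals : Int) (evals_per_gen : List Int), Dom_map_evaluations_to_generations num_evals evals_per_gen → Spec_map_evaluations_to_generations num_evals evals_per_gen (map_evaluations_to_generations num_evals evals_per_gen)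

-- ===== LEMMAS AND PROOFS =====
-- proof-side common characterisation of both ports
def pvGoB (gen remaining : Int) : List Int → List Int
  | [] => []
  | n :: rest =>
      let k := max 0 (min n remaining)
      List.replicate k.toNat gen ++ pvGoB (gen + 1) (remaining - k) rest

theorem pvFoldB_eq :
    ∀ (l : List Int) (gen : Int) (acc : List Int) (r : Int),
      ((PySem.List.enumerate l gen).foldl
        (fun (st : List Int × Int) p =>
          let k := max 0 (min p.2 st.2)
          (st.1 ++ List.replicate k.toNat p.1, st.2 - k))
        (acc, r)).1 = acc ++ pvGoB gen r l := by
  intro l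
  induction l with
  | nil => intro gen acc r; simp [PySem.List.enumerate_nil, pvGoB]
  | cons n rest ih =>
      intro gen acc r
      rw [PySem.List.enumerate_cons, List.foldl_cons, ih, pvGoB]
      simp [List.append_assoc]

theorem pvInnerA_eq (num_evals gen : Int) (k : Nat) :
    ∀ (idx : Int) (acc : List Int),
      pvInnerA num_evals gen k idx acc =
        (idx + (min k (num_evals - idx).toNat : Nat),
         acc ++ List.replicate (min k (num_evals - idx).toNat) gen) := by
  induction k with
  | zero => intro idx acc; simp [pvInnerA]
  | succ k ih =>
      intro idx acc
      by_cases h : num_evals ≤ idx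
      · have : (num_evals - idx).toNat = 0 := by omega
        simp [pvInnerA, h, this]
      · have ht : (num_evals - idx).toNat = (num_evals - (idx + 1)).toNat + 1 := by omega
        have hm : min (k + 1) ((num_evals - (idx + 1)).toNat + 1)
            = min k (num_evals - (idx + 1)).toNat + 1 := by omega
        rw [pvInnerA, if_neg h, ih, ht, hm]
        rw [Prod.mk.injEq]
        refine ⟨by push_cast; ring, ?_⟩
        rw [List.replicate_succ, List.append_assoc]
        rfl

theorem pvOuterA_eq (num_evals : Int) :
    ∀ (l : List Int) (gen idx : Int) (acc : List Int),
      pvOuterA num_evals gen idx acc l = acc ++ pvGoB gen (num_evals - idx) l := by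
  intro l
  induction l with
  | nil => intro gen idx acc; simp [pvOuterA, pvGoB]
  | cons n rest ih =>
      intro gen idx acc
      rw [pvOuterA, pvInnerA_eq, ih, pvGoB]
      set m : Nat := min n.toNat (num_evals - idx).toNat with hm
      set k : Int := max 0 (min n (num_evals - idx)) with hk
      have hkm : k = (m : Int) := by
        simp only [hk, hm]; omega
      have h2 : num_evals - (idx + (m : Int)) = num_evals - idx - k := by
        rw [hkm]; ring
      rw [h2, hkm]
      simp [List.append_assoc]

-- ===== VERDICT (by name: the statement is the Claim_ definition above) =====
theorem map_evaluations_to_generations_spec : Claim_equal_map_evaluations_to_generations := by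
  intro num_evals evals_per_gen _
  unfold Spec_map_evaluations_to_generations map_evaluations_to_generations map_evaluations_to_generations_alt
  rw [pvOuterA_eq, pvFoldB_eq]
  simp
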